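-- pv_equiv track=rewrite | github.com/eliottcassidy2000/math | 04-computation/blackself8_v2.py | build_self_converse_tournaments
-- ===== SOURCE A (Python) =====
-- def build_self_converse_tournaments(n, alpha):
--     """Build all tournaments with alpha as anti-automorphism."""
--     # Find free arc orbits under the constraint T(alpha(u), alpha(v)) = T(v, u)
--     # Equivalently T(i,j) = T(alpha(j), alpha(i))
--     free_arcs = []
--     determined = set()
--
--     for i in range(n):
--         for j in range(i+1, n):
--             if (i, j) in determined:
--                 continue
--             # T(i,j) determines T(alpha(j), alpha(i))
--             ai, aj = alpha[i], alpha[j]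
--             # T(aj, ai) = T(i, j) [since T(alpha(i), alpha(j)) = T(j, i) = 1-T(i,j),
--             # so T(alpha(j), alpha(i)) = T(i, j)]
--             u, v = min(aj, ai), max(aj, ai)
--             if (u, v) == (i, j):
--                 # Self-paired: no extra constraint
--                 free_arcs.append(((i, j), None))
--                 determined.add((i, j))
--             else:
--                 free_arcs.append(((i, j), (aj, ai)))  # Store actual direction
--                 determined.add((i, j))
--                 determined.add((u, v))
--
--     num_free = len(free_arcs)
--     tournaments = []
--
--     for bits in range(1 << num_free):
--         T = [[0]*n for _ in range(n)]
--         for k, (primary, linked) in enumerate(free_arcs):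
--             val = (bits >> k) & 1
--             i, j = primary
--             if val:
--                 T[i][j] = 1
--             else:
--                 T[j][i] = 1
--
--             if linked is not None:
--                 # T(linked[0], linked[1]) = val (same as T(i,j))
--                 a, b = linked
--                 if val:
--                     T[a][b] = 1
--                 else:
--                     T[b][a] = 1
--
--         tournaments.append(T)
--
--     return tournaments, num_free
-- ===== SOURCE B (Python) =====
-- def build_self_converse_tournaments(n, alpha):
--     """Build all tournaments with alpha as anti-automorphism."""
--     # Phase 1: same orbit scan, but over a flat pair generator.
--     free_arcs = []
--     determined = set()
--     for i, j in ((i, j) for i in range(n) for j in range(i + 1, n)):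
--         if (i, j) in determined:
--             continue
--         ai, aj = alpha[i], alpha[j]
--         u, v = min(aj, ai), max(aj, ai)
--         if (u, v) == (i, j):
--             free_arcs.append(((i, j), None))
--             determined.add((i, j))
--         else:
--             free_arcs.append(((i, j), (aj, ai)))
--             determined.add((i, j))
--             determined.add((u, v))
--     num_free = len(free_arcs)
--
--     # Phase 2: recursive DFS instead of the binary-counter loop.
--     # Arc index num_free-1 is the outermost branch, arc 0 the innermost,
--     # val 0 tried before val 1, reproducing the bits order of the counter.
--     def orient(T, arc, val):
--         (i, j), linked = arc
--         U = [row[:] for row in T]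
--         if val:
--             U[i][j] = 1
--         else:
--             U[j][i] = 1
--         if linked is not None:
--             a, b = linked
--             if val:
--                 U[a][b] = 1
--             else:
--                 U[b][a] = 1
--         return U
--
--     def dfs(k, T):
--         if k < 0:
--             return [T]
--         arc = free_arcs[k]
--         return dfs(k - 1, orient(T, arc, 0)) + dfs(k - 1, orient(T, arc, 1))
--
--     T0 = [[0] * n for _ in range(n)]
--     tournaments = dfs(num_free - 1, T0)
--     return tournaments, num_free
-- ===== Notes on version B (the rewrite author's own statement) =====
-- stated objective: alternative
-- what changed: The orbit scan runs over one flattened pair generator instead of two nested loops, and the 2^num_free binary-counter loop that rebuilds each matrix from scratch is replaced by a recursive DFS over the free arcs (arc num_free-1 outermost, val 0 before val 1) that extends a partially oriented matrix and emits the leaves in the same order.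
import Mathlib
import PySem

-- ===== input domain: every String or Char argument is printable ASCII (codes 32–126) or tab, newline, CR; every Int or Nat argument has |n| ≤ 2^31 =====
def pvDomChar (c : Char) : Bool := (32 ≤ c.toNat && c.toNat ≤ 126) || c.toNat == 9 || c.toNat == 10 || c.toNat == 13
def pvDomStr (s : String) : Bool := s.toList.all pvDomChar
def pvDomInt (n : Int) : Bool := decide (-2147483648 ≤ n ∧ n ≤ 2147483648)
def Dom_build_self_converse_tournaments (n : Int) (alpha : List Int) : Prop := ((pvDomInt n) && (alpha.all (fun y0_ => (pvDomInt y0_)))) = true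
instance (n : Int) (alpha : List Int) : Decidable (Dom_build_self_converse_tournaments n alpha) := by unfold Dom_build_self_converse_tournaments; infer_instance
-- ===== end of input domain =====

-- B replaces A's 2^k binary-counter loop by a recursive DFS over the free arcs (and scans the
-- orbit pairs in one flat pass); objective: alternative decomposition, same exact output.

-- Shared low-level primitive: the Python statement 'T[i][j] = 1' (read row T[i], set column j,
-- store the row back), with Python's exact negative-index semantics via pySetD/pyGetD.
def pySetCell (T : List (List Int)) (i j : Int) : List (List Int) :=
  PySem.List.pySetD T i (PySem.List.pySetD (PySem.List.pyGetD T i []) j 1)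

-- ===== PORT A =====
-- A's phase 1: the nested 'for i in range(n): for j in range(i+1, n):' orbit scan
def pvAScan (n : Int) (alpha : List Int) :
    List ((Int × Int) × Option (Int × Int)) × PySem.Set (Int × Int) :=
  (PySem.List.pyRange 0 n 1).foldl (fun st i =>
    (PySem.List.pyRange (i + 1) n 1).foldl (fun st j =>
      if PySem.Set.contains st.2 (i, j) then st
      else
        let ai := PySem.List.pyGetD alpha i 0
        let aj := PySem.List.pyGetD alpha j 0
        let u := min aj ai
        let v := max aj ai
        if (u, v) = (i, j) then
          (st.1 ++ [((i, j), (none : Option (Int × Int)))], PySem.Set.add st.2 (i, j))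
        else
          (st.1 ++ [((i, j), some (aj, ai))], PySem.Set.add (PySem.Set.add st.2 (i, j)) (u, v))) st)
    ([], [])

-- loop body of A's 'for k, (primary, linked) in enumerate(free_arcs)'
def pvAStep (bits : Int) (T : List (List Int)) (ka : Int × ((Int × Int) × Option (Int × Int))) :
    List (List Int) :=
  let val : Int := PySem.Int.band (bits >>> ka.1.toNat) 1
  let U := if val ≠ 0 then pySetCell T ka.2.1.1 ka.2.1.2 else pySetCell T ka.2.1.2 ka.2.1.1
  match ka.2.2 with
  | none => U
  | some ab => if val ≠ 0 then pySetCell U ab.1 ab.2 else pySetCell U ab.2 ab.1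

def build_self_converse_tournaments (n : Int) (alpha : List Int) :
    List (List (List Int)) × Int :=
  let free_arcs := (pvAScan n alpha).1
  let num_free : Int := PySem.List.len free_arcs
  let tournaments := (PySem.List.pyRange 0 ((1 : Int) <<< num_free.toNat) 1).foldl
    (fun ts bits =>
      ts ++ [(PySem.List.enumerate free_arcs).foldl (pvAStep bits)
        (List.replicate n.toNat (List.replicate n.toNat 0))]) []
  (tournaments, num_free)

-- ===== PORT B =====
-- the flat pair generator '((i, j) for i in range(n) for j in range(i+1, n))'
def pvBPairs (n : Int) : List (Int × Int) :=
  (PySem.List.pyRange 0 n 1).flatMap fun i =>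
    (PySem.List.pyRange (i + 1) n 1).map fun j => (i, j)

-- loop body of B's single orbit-scan loop over the pairs
def pvBScanStep (alpha : List Int)
    (st : List ((Int × Int) × Option (Int × Int)) × PySem.Set (Int × Int)) (p : Int × Int) :
    List ((Int × Int) × Option (Int × Int)) × PySem.Set (Int × Int) :=
  if PySem.Set.contains st.2 p then st
  else
    let ai := PySem.List.pyGetD alpha p.1 0
    let aj := PySem.List.pyGetD alpha p.2 0
    let u := min aj ai
    let v := max aj ai
    if (u, v) = p then (st.1 ++ [(p, none)], PySem.Set.add st.2 p)
    else (st.1 ++ [(p, some (aj, ai))], PySem.Set.add (PySem.Set.add st.2 p) (u, v))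

-- B's 'orient': a fresh copy of T with the arc (and its linked arc) oriented by val
def pvBOrient (T : List (List Int)) (arc : (Int × Int) × Option (Int × Int)) (val : Int) :
    List (List Int) :=
  let U := if val ≠ 0 then pySetCell T arc.1.1 arc.1.2 else pySetCell T arc.1.2 arc.1.1
  match arc.2 with
  | none => U
  | some ab => if val ≠ 0 then pySetCell U ab.1 ab.2 else pySetCell U ab.2 ab.1

-- B's 'dfs(k, T)': arc k is branched on (val 0 before val 1), recursing down to arc 0
def pvBDfs (arcs : List ((Int × Int) × Option (Int × Int))) (k : Int) (T : List (List Int)) :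
    List (List (List Int)) :=
  if h : k < 0 then [T]
  else
    pvBDfs arcs (k - 1) (pvBOrient T (PySem.List.pyGetD arcs k ((0, 0), none)) 0) ++
    pvBDfs arcs (k - 1) (pvBOrient T (PySem.List.pyGetD arcs k ((0, 0), none)) 1)
termination_by (k + 1).toNat
decreasing_by all_goals (simp_wf; omega)

def build_self_converse_tournaments_alt (n : Int) (alpha : List Int) :
    List (List (List Int)) × Int :=
  let free_arcs := ((pvBPairs n).foldl (pvBScanStep alpha) ([], [])).1
  let num_free : Int := PySem.List.len free_arcs
  let T0 : List (List Int) := List.replicate n.toNat (List.replicate n.toNat 0)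
  (pvBDfs free_arcs (num_free - 1) T0, num_free)

-- ===== PRECONDITION & SPEC =====
-- Exactly the inputs on which the Python A returns: for n ≥ 2 it reads alpha[0..n-1]
-- (IndexError if alpha is shorter) and writes T at the alpha values of every scanned pair
-- (IndexError unless each such value is in [-n, n)); for n ≤ 1 there is no pair and no read.
def Pre_build_self_converse_tournaments (n : Int) (alpha : List Int) : Prop :=
  n ≤ 1 ∨ (n ≤ (alpha.length : Int) ∧ ∀ v ∈ alpha.take n.toNat, -n ≤ v ∧ v < n)
instance (n : Int) (alpha : List Int) : Decidable (Pre_build_self_converse_tournaments n alpha) := by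
  unfold Pre_build_self_converse_tournaments; infer_instance

def pvWitness_build_self_converse_tournaments : Int × List Int := (3, [2, 1, 0])

def Spec_build_self_converse_tournaments (n : Int) (alpha : List Int) (out : List (List (List Int)) × Int) : Prop := out = build_self_converse_tournaments_alt n alpha
instance (n : Int) (alpha : List Int) (out : List (List (List Int)) × Int) : Decidable (Spec_build_self_converse_tournaments n alpha out) := by unfold Spec_build_self_converse_tournaments; infer_instance

-- ===== CLAIM (what is proved, stated in full; the proofs are below) =====
def Claim_equal_build_self_converse_tournaments : Prop := ∀ (n : Int) (alpha : List Int), Dom_build_self_converse_tournaments n alpha → Pre_build_self_converse_tournaments n alpha → Spec_build_self_converse_tournaments n alpha (build_self_converse_tournaments n alpha)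

-- ===== LEMMAS AND PROOFS =====

theorem pv_foldl_flatMap {α β γ : Type} (l : List α) (g : α → List β) (f : γ → β → γ)
    (init : γ) :
    (l.flatMap g).foldl f init = l.foldl (fun acc x => (g x).foldl f acc) init := by
  induction l generalizing init with
  | nil => rfl
  | cons x l ih => simp [List.foldl_append, ih]

-- Phase 1: the two orbit scans are the same fold.
theorem pv_scan_eq (n : Int) (alpha : List Int) :
    pvAScan n alpha = (pvBPairs n).foldl (pvBScanStep alpha) ([], []) := by
  unfold pvAScan pvBPairs
  rw [pv_foldl_flatMap]
  simp only [List.foldl_map]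
  rfl

-- index-resolution facts
theorem pv_pyIdx_lt {n : Nat} {i : Int} {k : Nat} (h : PySem.List.pyIdx? n i = some k) : k < n := by
  unfold PySem.List.pyIdx? at h
  split_ifs at h <;> simp_all <;> omega

theorem pv_getElem?_pySetD {α : Type} (xs : List α) (i : Int) (v : α) (r : Nat) :
    (PySem.List.pySetD xs i v)[r]? =
      if PySem.List.pyIdx? xs.length i = some r then some v else xs[r]? := by
  unfold PySem.List.pySetD PySem.List.pySet?
  cases h : PySem.List.pyIdx? xs.length i with
  | none => simp [h]
  | some k =>
    have hk := pv_pyIdx_lt h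
    by_cases hkr : k = r
    · subst hkr; simp [h, List.getElem?_set, hk]
    · simp [h, List.getElem?_set, hkr]

theorem pv_length_pySetCell (T : List (List Int)) (i j : Int) :
    (pySetCell T i j).length = T.length := by
  simp [pySetCell, PySem.List.length_pySetD]

theorem pv_getElem?_pySetCell (T : List (List Int)) (i j : Int) (r : Nat) :
    (pySetCell T i j)[r]? =
      if PySem.List.pyIdx? T.length i = some r
      then some (PySem.List.pySetD (PySem.List.pyGetD T i []) j 1) else T[r]? := by
  exact pv_getElem?_pySetD T i _ r

theorem pv_pyGetD_some {α : Type} (xs : List α) (i : Int) (d : α) (r : Nat)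
    (h : PySem.List.pyIdx? xs.length i = some r) :
    PySem.List.pyGetD xs i d = (xs[r]?).getD d := by
  unfold PySem.List.pyGetD PySem.List.pyGet?
  simp [h]

-- all writes store the same value 1, so row writes commute …
theorem pv_pySetD_comm (xs : List Int) (b d : Int) :
    PySem.List.pySetD (PySem.List.pySetD xs b 1) d 1
      = PySem.List.pySetD (PySem.List.pySetD xs d 1) b 1 := by
  apply List.ext_getElem?
  intro r
  rw [pv_getElem?_pySetD, pv_getElem?_pySetD, pv_getElem?_pySetD, pv_getElem?_pySetD,
    PySem.List.length_pySetD, PySem.List.length_pySetD]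
  split_ifs <;> rfl

-- … and cell writes commute.
theorem pv_pySetCell_comm (T : List (List Int)) (a b c d : Int) :
    pySetCell (pySetCell T a b) c d = pySetCell (pySetCell T c d) a b := by
  apply List.ext_getElem?
  intro r
  rw [pv_getElem?_pySetCell, pv_getElem?_pySetCell, pv_getElem?_pySetCell, pv_getElem?_pySetCell,
    pv_length_pySetCell, pv_length_pySetCell]
  by_cases ha : PySem.List.pyIdx? T.length a = some r <;>
    by_cases hc : PySem.List.pyIdx? T.length c = some r <;>
    simp only [ha, hc, if_true, if_false, ite_true, ite_false]
  · -- both resolve to row r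
    have g1 : PySem.List.pyGetD (pySetCell T a b) c []
        = PySem.List.pySetD (PySem.List.pyGetD T a []) b 1 := by
      rw [pv_pyGetD_some _ _ _ r (by rw [pv_length_pySetCell]; exact hc),
        pv_getElem?_pySetCell, if_pos ha]
      rfl
    have g2 : PySem.List.pyGetD (pySetCell T c d) a []
        = PySem.List.pySetD (PySem.List.pyGetD T c []) d 1 := by
      rw [pv_pyGetD_some _ _ _ r (by rw [pv_length_pySetCell]; exact ha),
        pv_getElem?_pySetCell, if_pos hc]
      rfl
    have g3 : PySem.List.pyGetD T a [] = PySem.List.pyGetD T c [] := by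
      rw [pv_pyGetD_some _ _ _ r ha, pv_pyGetD_some _ _ _ r hc]
    rw [g1, g2, g3, pv_pySetD_comm]
  · -- only a resolves to row r
    have g : PySem.List.pyGetD (pySetCell T c d) a [] = PySem.List.pyGetD T a [] := by
      rw [pv_pyGetD_some _ _ _ r (by rw [pv_length_pySetCell]; exact ha),
        pv_getElem?_pySetCell, if_neg hc, ← pv_pyGetD_some _ _ _ r ha]
    rw [g]
  · -- only c resolves to row r
    have g : PySem.List.pyGetD (pySetCell T a b) c [] = PySem.List.pyGetD T c [] := by
      rw [pv_pyGetD_some _ _ _ r (by rw [pv_length_pySetCell]; exact hc),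
        pv_getElem?_pySetCell, if_neg ha, ← pv_pyGetD_some _ _ _ r hc]
    rw [g]

-- writes of one orient step, as data
def pvWrites (arc : (Int × Int) × Option (Int × Int)) (val : Int) : List (Int × Int) :=
  (if val ≠ 0 then [(arc.1.1, arc.1.2)] else [(arc.1.2, arc.1.1)]) ++
  (match arc.2 with
   | none => []
   | some ab => if val ≠ 0 then [(ab.1, ab.2)] else [(ab.2, ab.1)])

theorem pv_orient_eq_writes (T : List (List Int)) (arc : (Int × Int) × Option (Int × Int))
    (val : Int) :
    pvBOrient T arc val = (pvWrites arc val).foldl (fun U w => pySetCell U w.1 w.2) T := by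
  rcases arc with ⟨⟨i, j⟩, ab⟩
  by_cases hv : val ≠ 0
  · cases ab <;> simp [pvBOrient, pvWrites, hv]
  · cases ab <;> simp [pvBOrient, pvWrites, hv]

theorem pv_foldl_writes_setCell (ws : List (Int × Int)) (T : List (List Int)) (a b : Int) :
    ws.foldl (fun U w => pySetCell U w.1 w.2) (pySetCell T a b)
      = pySetCell (ws.foldl (fun U w => pySetCell U w.1 w.2) T) a b := by
  induction ws generalizing T with
  | nil => rfl
  | cons w ws ih =>
    simp only [List.foldl_cons]
    rw [pv_pySetCell_comm, ih]

theorem pv_foldl_writes_swap (ws ws' : List (Int × Int)) (T : List (List Int)) :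
    ws'.foldl (fun U w => pySetCell U w.1 w.2) (ws.foldl (fun U w => pySetCell U w.1 w.2) T)
      = ws.foldl (fun U w => pySetCell U w.1 w.2)
          (ws'.foldl (fun U w => pySetCell U w.1 w.2) T) := by
  induction ws' generalizing T with
  | nil => rfl
  | cons x ws' ih =>
    simp only [List.foldl_cons]
    rw [← pv_foldl_writes_setCell, ih]

theorem pv_orient_comm (T : List (List Int)) (arc arc' : (Int × Int) × Option (Int × Int))
    (v v' : Int) :
    pvBOrient (pvBOrient T arc v) arc' v' = pvBOrient (pvBOrient T arc' v') arc v := by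
  simp only [pv_orient_eq_writes]
  exact pv_foldl_writes_swap _ _ _

theorem pv_step_eq (bits : Int) (T : List (List Int))
    (ka : Int × ((Int × Int) × Option (Int × Int))) :
    pvAStep bits T ka = pvBOrient T ka.2 (PySem.Int.band (bits >>> ka.1.toNat) 1) := rfl

theorem pv_foldl_step_orient (bits : Int) (l : List (Int × ((Int × Int) × Option (Int × Int))))
    (T : List (List Int)) (arc : (Int × Int) × Option (Int × Int)) (v : Int) :
    l.foldl (pvAStep bits) (pvBOrient T arc v) = pvBOrient (l.foldl (pvAStep bits) T) arc v := by
  induction l generalizing T with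
  | nil => rfl
  | cons ka l ih =>
    simp only [List.foldl_cons]
    rw [pv_step_eq bits (pvBOrient T arc v) ka, pv_orient_comm, ← pv_step_eq, ih]

-- A's per-bits matrix restricted to the first m arcs
def pvBuildA (bits : Int) (fa : List ((Int × Int) × Option (Int × Int))) (m : Nat)
    (T : List (List Int)) : List (List Int) :=
  (PySem.List.enumerate (fa.take m)).foldl (pvAStep bits) T

theorem pv_buildA_orient (bits : Int) (fa : List ((Int × Int) × Option (Int × Int))) (m : Nat)
    (T : List (List Int)) (arc : (Int × Int) × Option (Int × Int)) (v : Int) :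
    pvBuildA bits fa m (pvBOrient T arc v) = pvBOrient (pvBuildA bits fa m T) arc v :=
  pv_foldl_step_orient _ _ _ _ _

theorem pv_step_bits_congr (bits bits' : Int) (T : List (List Int))
    (ka : Int × ((Int × Int) × Option (Int × Int)))
    (h : PySem.Int.band (bits >>> ka.1.toNat) 1 = PySem.Int.band (bits' >>> ka.1.toNat) 1) :
    pvAStep bits T ka = pvAStep bits' T ka := by
  rw [pv_step_eq, pv_step_eq, h]

-- bit arithmetic
theorem pv_bit_low (m k b : Nat) (hk : k < m) (hb : b < 2 ^ m) :
    ((2 ^ m + b) >>> k) &&& 1 = (b >>> k) &&& 1 := by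
  obtain ⟨t, rfl⟩ : ∃ t, m = k + 1 + t := ⟨m - k - 1, by omega⟩
  rw [Nat.and_one_is_mod, Nat.and_one_is_mod, Nat.shiftRight_eq_div_pow,
    Nat.shiftRight_eq_div_pow]
  have h2 : 2 ^ (k + 1 + t) = 2 ^ k * (2 * 2 ^ t) := by ring
  rw [h2, Nat.mul_add_div (by positivity)]
  omega

theorem pv_band_natCast_one (x : Nat) :
    PySem.Int.band ((x : Int)) 1 = ((x &&& 1 : Nat) : Int) := by
  simpa using PySem.Int.band_natCast x 1

theorem pv_shift_natCast (x : Nat) (k : Nat) : ((x : Int) >>> k) = ((x >>> k : Nat) : Int) := by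
  rfl

theorem pv_bit_top_lo (m b : Nat) (hb : b < 2 ^ m) : (b >>> m) &&& 1 = 0 := by
  simp [Nat.shiftRight_eq_div_pow, Nat.div_eq_of_lt hb]

theorem pv_bit_top_hi (m b : Nat) (hb : b < 2 ^ m) : ((2 ^ m + b) >>> m) &&& 1 = 1 := by
  rw [Nat.shiftRight_eq_div_pow, Nat.and_one_is_mod]
  have h1 : (2 ^ m + b) / 2 ^ m = 1 := by
    rw [Nat.add_comm, Nat.add_div_right _ (by positivity), Nat.div_eq_of_lt hb]
  rw [h1]

theorem pv_buildA_bits_irrel (fa : List ((Int × Int) × Option (Int × Int))) (m b : Nat)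
    (hb : b < 2 ^ m) (T : List (List Int)) :
    pvBuildA ((2 ^ m + b : Nat) : Int) fa m T = pvBuildA ((b : Nat) : Int) fa m T := by
  unfold pvBuildA
  apply PySem.List.foldl_congr_mem
  intro acc x hx
  obtain ⟨k', hk', hxe⟩ := (PySem.List.mem_enumerate_iff _ _ _).mp hx
  subst hxe
  apply pv_step_bits_congr
  have hkm : k' < m := by
    have := List.length_take_le m fa
    omega
  have ht : ((0 : Int) + (k' : Int)).toNat = k' := by omega
  dsimp only
  rw [ht, pv_shift_natCast, pv_shift_natCast, pv_band_natCast_one, pv_band_natCast_one,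
    pv_bit_low m k' b hkm hb]

theorem pv_buildA_succ (fa : List ((Int × Int) × Option (Int × Int))) (m : Nat)
    (hm : m < fa.length) (bits : Int) (T : List (List Int)) :
    pvBuildA bits fa (m + 1) T
      = pvAStep bits (pvBuildA bits fa m T) ((m : Int), fa[m]) := by
  unfold pvBuildA
  have hl : (fa.take m).length = m := by simp [List.length_take]; omega
  have hsplit : fa.take (m + 1) = fa.take m ++ [fa[m]] := by
    rw [List.take_add_one, List.getElem?_eq_getElem hm]
    rfl
  rw [hsplit, PySem.List.enumerate_append, List.foldl_append, hl]
  simp [PySem.List.enumerate_cons, PySem.List.enumerate_nil]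

-- the central lemma: the DFS enumerates exactly A's binary-counter order
theorem pv_dfs_eq (fa : List ((Int × Int) × Option (Int × Int))) (m : Nat)
    (hm : m ≤ fa.length) (T : List (List Int)) :
    pvBDfs fa ((m : Int) - 1) T
      = (List.range (2 ^ m)).map (fun b => pvBuildA ((b : Nat) : Int) fa m T) := by
  induction m generalizing T with
  | zero =>
    rw [pvBDfs]
    norm_num
    simp [pvBuildA, PySem.List.enumerate_nil]
  | succ m ih =>
    have hm' : m < fa.length := by omega
    have hcast : ((m + 1 : Nat) : Int) - 1 = ((m : Nat) : Int) := by push_cast; ring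
    rw [hcast, pvBDfs, dif_neg (by omega : ¬ ((m : Nat) : Int) < 0)]
    have hget : PySem.List.pyGetD fa ((m : Nat) : Int) ((0, 0), none) = fa[m] := by
      simp [PySem.List.pyGetD_natCast, List.getD_eq_getElem?_getD,
        List.getElem?_eq_getElem hm']
    rw [hget, ih (by omega), ih (by omega)]
    rw [show (2 : Nat) ^ (m + 1) = 2 ^ m + 2 ^ m from by rw [pow_succ]; omega]
    rw [List.range_add, List.map_append, List.map_map]
    congr 1
    · apply List.map_congr_left
      intro b hb
      have hb' : b < 2 ^ m := List.mem_range.mp hb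
      rw [pv_buildA_succ fa m hm', pv_step_eq]
      dsimp only
      rw [Int.toNat_natCast, pv_shift_natCast, pv_band_natCast_one, pv_bit_top_lo m b hb']
      rw [show (((0 : Nat) : Int)) = (0 : Int) from rfl]
      exact pv_buildA_orient _ _ _ _ _ _
    · apply List.map_congr_left
      intro b hb
      have hb' : b < 2 ^ m := List.mem_range.mp hb
      simp only [Function.comp]
      rw [show ((2 ^ m + b : Nat) : Int) = (((2 ^ m + b : Nat) : Nat) : Int) from rfl]
      rw [pv_buildA_succ fa m hm', pv_step_eq]
      dsimp only
      rw [Int.toNat_natCast, pv_shift_natCast, pv_band_natCast_one, pv_bit_top_hi m b hb']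
      rw [pv_buildA_bits_irrel fa m b hb']
      rw [show (((1 : Nat) : Int)) = (1 : Int) from rfl]
      exact pv_buildA_orient _ _ _ _ _ _

-- ===== VERDICT (by name: the statement is the Claim_ definition above) =====
theorem build_self_converse_tournaments_spec : Claim_equal_build_self_converse_tournaments := by
  intro n alpha _ _
  unfold Spec_build_self_converse_tournaments
  simp only [build_self_converse_tournaments, build_self_converse_tournaments_alt]
  rw [pv_scan_eq n alpha]
  set fa := ((pvBPairs n).foldl (pvBScanStep alpha) ([], [])).1 with hfa
  simp only [PySem.List.len_eq, Int.toNat_natCast]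
  rw [show (1 : Int) <<< fa.length = ((2 ^ fa.length : Nat) : Int) from by
    rw [← Nat.one_shiftLeft]; rfl]
  rw [PySem.List.pyRange_zero_natCast]
  rw [PySem.List.foldl_append_singleton_eq_map]
  simp only [List.nil_append, List.map_map]
  rw [pv_dfs_eq fa fa.length le_rfl]
  apply congrArg (fun x => (x, (fa.length : Int)))
  apply List.map_congr_left
  intro b hb
  simp only [Function.comp]
  unfold pvBuildA
  rw [List.take_length]
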